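-- pv_equiv track=rewrite | github.com/aorangehc/Daily-coding | 字节豆包MarsCode-青训营-寒假专场/codes/Python/优秀项目组初选评比.py | solution
-- ===== SOURCE A (Python) =====
-- def solution(m: int, n: int, a: list) -> int:
--     if 2 * n < len(a):
--         return -1
--
--     a.sort()
--
--     for i in range(len(a)):
--         if i + 1 >= m and i + 1 <= n and len(a) - i - 1 >= m and len(a) - i - 1 <= n:
--             return a[i]
--
--
--     return -1
-- ===== SOURCE B (Python) =====
-- def solution(m: int, n: int, a: list) -> int:
--     if 2 * n < len(a):
--         return -1
--     a.sort()
--     L = len(a)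
--     lo = max(m - 1, L - 1 - n, 0)
--     hi = min(n - 1, L - 1 - m, L - 1)
--     return a[lo] if lo <= hi else -1
-- ===== Notes on version B (the rewrite author's own statement) =====
-- stated objective: simpler
-- what changed: Replaces the linear scan for the first index satisfying the four group-size inequalities with a closed-form computation of the valid index interval [lo,hi], returning a[lo] when it is nonempty (the in-place sort dominates the runtime, so the measured cost is the same).
import Mathlib
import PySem

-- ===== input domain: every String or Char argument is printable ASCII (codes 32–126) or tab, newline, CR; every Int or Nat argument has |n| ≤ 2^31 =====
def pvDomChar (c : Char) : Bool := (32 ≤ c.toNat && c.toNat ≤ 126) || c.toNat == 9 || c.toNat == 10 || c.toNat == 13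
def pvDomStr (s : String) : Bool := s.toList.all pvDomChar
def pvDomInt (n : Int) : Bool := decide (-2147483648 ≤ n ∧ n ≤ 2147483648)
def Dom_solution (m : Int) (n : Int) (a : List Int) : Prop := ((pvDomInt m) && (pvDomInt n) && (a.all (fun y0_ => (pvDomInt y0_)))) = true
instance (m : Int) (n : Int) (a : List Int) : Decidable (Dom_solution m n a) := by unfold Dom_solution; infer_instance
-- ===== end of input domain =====

-- B replaces A's linear first-match scan with a constant-time closed-form index interval
-- (equivalence is about the RETURN value; both Pythons also sort `a` in place).

-- ===== PORT A =====
-- the for-loop: first i with the four inequalities returns a[i], else -1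
def solLoop (s : List Int) (L m n : Int) : List Int → Int
  | [] => -1
  | i :: rest =>
      if m ≤ i + 1 ∧ i + 1 ≤ n ∧ m ≤ L - i - 1 ∧ L - i - 1 ≤ n then
        (PySem.List.pyGet? s i).getD (-1)   -- a[i]; i is in range, so the default is never used
      else solLoop s L m n rest

def solution (m : Int) (n : Int) (a : List Int) : Int :=
  if 2 * n < (a.length : Int) then -1
  else
    let s := PySem.List.sorted a (fun x => x) false
    solLoop s (a.length : Int) m n (PySem.List.pyRange 0 (a.length : Int) 1)

-- ===== PORT B =====
def solution_alt (m : Int) (n : Int) (a : List Int) : Int :=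
  if 2 * n < (a.length : Int) then -1
  else
    let s := PySem.List.sorted a (fun x => x) false
    let L : Int := (a.length : Int)
    let lo := max (max (m - 1) (L - 1 - n)) 0
    let hi := min (min (n - 1) (L - 1 - m)) (L - 1)
    if lo ≤ hi then (PySem.List.pyGet? s lo).getD (-1) else -1

-- ===== PRECONDITION & SPEC =====
def Spec_solution (m : Int) (n : Int) (a : List Int) (out : Int) : Prop := out = solution_alt m n a
instance (m : Int) (n : Int) (a : List Int) (out : Int) : Decidable (Spec_solution m n a out) := by unfold Spec_solution; infer_instance

-- ===== CLAIM (what is proved, stated in full; the proofs are below) =====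
def Claim_equal_solution : Prop := ∀ (m : Int) (n : Int) (a : List Int), Dom_solution m n a → Spec_solution m n a (solution m n a)

-- ===== LEMMAS AND PROOFS =====

-- A's scan over range(k, L) returns a[max(lo',k)] iff that clamped index lies in the valid interval
theorem solLoop_pyRange (s : List Int) (L m n : Int) (k : Int) :
    solLoop s L m n (PySem.List.pyRange k L 1) =
      (if max (max (m - 1) (L - 1 - n)) k ≤ min (min (n - 1) (L - 1 - m)) (L - 1) then
         (PySem.List.pyGet? s (max (max (m - 1) (L - 1 - n)) k)).getD (-1)
       else -1) := by
  induction hN : (L - k).toNat generalizing k with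
  | zero =>
    have hLk : L ≤ k := by omega
    rw [PySem.List.pyRange_one_eq_nil hLk]
    rw [if_neg (by omega)]
    rfl
  | succ N ih =>
    have hkL : k < L := by omega
    rw [PySem.List.pyRange_one_cons hkL]
    simp only [solLoop]
    by_cases hc : m ≤ k + 1 ∧ k + 1 ≤ n ∧ m ≤ L - k - 1 ∧ L - k - 1 ≤ n
    · rw [if_pos hc]
      have hmax : max (max (m - 1) (L - 1 - n)) k = k := by omega
      rw [hmax, if_pos (by omega)]
    · rw [if_neg hc, ih (k + 1) (by omega)]
      by_cases hlo : k < max (m - 1) (L - 1 - n)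
      · have : max (max (m - 1) (L - 1 - n)) (k + 1) = max (max (m - 1) (L - 1 - n)) k := by
          omega
        rw [this]
      · push Not at hc hlo
        rw [if_neg (by omega), if_neg (by omega)]

-- ===== VERDICT (by name: the statement is the Claim_ definition above) =====
theorem solution_spec : Claim_equal_solution := by
  intro m n a _
  unfold Spec_solution solution solution_alt
  by_cases hg : 2 * n < (a.length : Int)
  · rw [if_pos hg, if_pos hg]
  · rw [if_neg hg, if_neg hg]
    exact solLoop_pyRange _ _ m n 0
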